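-- pv_equiv track=rewrite | github.com/candychiang/line-pricing-bot | test_bot.py | kinlian_price
-- ===== SOURCE A (Python) =====
-- KINLIAN = {
--     "高市":  [(60,600),(100,800),(200,900),(300,1100),(400,1200),(500,1300),(600,1400)],
--     "台南":  [(60,900),(100,1100),(200,1200),(300,1400),(400,1500),(500,1600),(600,1700)],
-- }
--
-- def kinlian_price(area, base, charge_w, addon=0):
--     tiers = KINLIAN.get(base, KINLIAN["高市"])
--     p = None
--     for limit, price in tiers:
--         if charge_w <= limit:
--             p = price; break
--     if p is None:
--         over = charge_w - 600
--         p = tiers[-1][1] + (int(over/100)+(1 if over%100>0 else 0))*100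
--     return p + addon
-- ===== SOURCE B (Python) =====
-- KINLIAN = {
--     "高市":  [(60,600),(100,800),(200,900),(300,1100),(400,1200),(500,1300),(600,1400)],
--     "台南":  [(60,900),(100,1100),(200,1200),(300,1400),(400,1500),(500,1600),(600,1700)],
-- }
--
-- def kinlian_price(area, base, charge_w, addon=0):
--     # Closed form: tier limits are 60 then 100*k (k=1..6), so the tier index
--     # is ceil(charge_w/100) (floored at 0); beyond 6 each extra 100g adds 100.
--     prices = [price for _, price in KINLIAN.get(base, KINLIAN["高市"])]
--     if charge_w <= 60:
--         p = prices[0]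
--     else:
--         k = -(-charge_w // 100)
--         p = prices[k] if k <= 6 else prices[6] + (k - 6) * 100
--     return p + addon
-- ===== Notes on version B (the rewrite author's own statement) =====
-- stated objective: alternative
-- what changed: Replaces the linear scan over the tier list and the separate overflow branch by one closed-form computation: the tier index is ceil(charge_w/100) (0 below 61g) because the limits are 60 then 100*k, and any index beyond 6 adds (k-6)*100 to the top price.
import Mathlib
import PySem

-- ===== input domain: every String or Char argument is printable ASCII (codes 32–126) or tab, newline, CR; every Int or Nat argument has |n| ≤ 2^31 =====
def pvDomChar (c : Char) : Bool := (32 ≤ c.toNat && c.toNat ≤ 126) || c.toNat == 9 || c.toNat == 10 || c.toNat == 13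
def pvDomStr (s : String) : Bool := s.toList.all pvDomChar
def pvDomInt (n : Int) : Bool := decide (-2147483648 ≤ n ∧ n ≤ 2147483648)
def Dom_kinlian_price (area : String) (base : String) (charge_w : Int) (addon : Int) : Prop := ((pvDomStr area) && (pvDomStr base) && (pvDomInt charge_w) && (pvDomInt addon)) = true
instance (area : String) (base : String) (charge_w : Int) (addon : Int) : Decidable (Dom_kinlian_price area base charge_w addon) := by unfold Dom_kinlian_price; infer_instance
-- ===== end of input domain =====

-- B replaces A's linear tier scan by a closed-form ceil(charge_w/100) tier index (alternative decomposition, same result).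

-- ===== PORT A =====
def KINLIAN : PySem.Dict String (List (Int × Int)) :=
  PySem.Dict.ofList
    [("高市", [(60,600),(100,800),(200,900),(300,1100),(400,1200),(500,1300),(600,1400)]),
     ("台南", [(60,900),(100,1100),(200,1200),(300,1400),(400,1500),(500,1600),(600,1700)])]

-- the 'for limit, price in tiers: if charge_w <= limit: p = price; break' loop (p = none if no break)
def kinlianLoop (tiers : List (Int × Int)) (charge_w : Int) : Option Int :=
  match tiers with
  | [] => none
  | (limit, price) :: rest => if charge_w ≤ limit then some price else kinlianLoop rest charge_w

def kinlian_price (area : String) (base : String) (charge_w : Int) (addon : Int) : Int :=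
  let tiers := PySem.Dict.getD KINLIAN base ((PySem.Dict.get? KINLIAN "高市").getD [])
  match kinlianLoop tiers charge_w with
  | some p => p + addon
  | none =>
      let overW := charge_w - 600
      -- int(over/100) is exact truncating division on the |n| ≤ 2^31 domain (float is exact there)
      ((PySem.List.pyGet? tiers (-1)).getD (0, 0)).2
        + (PySem.Int.truncdiv overW 100 + (if PySem.Int.mod overW 100 > 0 then 1 else 0)) * 100 + addon

-- ===== PORT B =====
def kinlian_price_alt (area : String) (base : String) (charge_w : Int) (addon : Int) : Int :=
  let prices := (PySem.Dict.getD KINLIAN base ((PySem.Dict.get? KINLIAN "高市").getD [])).map Prod.snd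
  let p :=
    if charge_w ≤ 60 then (PySem.List.pyGet? prices 0).getD 0
    else
      let k := -(PySem.Int.floordiv (-charge_w) 100)   -- ceil(charge_w/100)
      if k ≤ 6 then (PySem.List.pyGet? prices k).getD 0
      else (PySem.List.pyGet? prices 6).getD 0 + (k - 6) * 100
  p + addon

-- ===== PRECONDITION & SPEC =====
def Spec_kinlian_price (area : String) (base : String) (charge_w : Int) (addon : Int) (out : Int) : Prop := out = kinlian_price_alt area base charge_w addon
instance (area : String) (base : String) (charge_w : Int) (addon : Int) (out : Int) : Decidable (Spec_kinlian_price area base charge_w addon out) := by unfold Spec_kinlian_price; infer_instance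

-- ===== CLAIM (what is proved, stated in full; the proofs are below) =====
def Claim_equal_kinlian_price : Prop := ∀ (area : String) (base : String) (charge_w : Int) (addon : Int), Dom_kinlian_price area base charge_w addon → Spec_kinlian_price area base charge_w addon (kinlian_price area base charge_w addon)

-- ===== LEMMAS AND PROOFS =====

-- core equivalence for one tier table [(60,p0),(100,p1),…,(600,p6)]: A's body = B's body
theorem kinlian_core (p0 p1 p2 p3 p4 p5 p6 charge_w addon : Int) :
    (match kinlianLoop [(60,p0),(100,p1),(200,p2),(300,p3),(400,p4),(500,p5),(600,p6)] charge_w with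
     | some p => p + addon
     | none =>
        ((PySem.List.pyGet? [(60,p0),(100,p1),(200,p2),(300,p3),(400,p4),(500,p5),(600,p6)] (-1)).getD (0,0)).2
          + (PySem.Int.truncdiv (charge_w - 600) 100
             + (if PySem.Int.mod (charge_w - 600) 100 > 0 then 1 else 0)) * 100 + addon)
    = (if charge_w ≤ 60 then (PySem.List.pyGet? [p0,p1,p2,p3,p4,p5,p6] 0).getD 0
       else if -(PySem.Int.floordiv (-charge_w) 100) ≤ 6 then
         (PySem.List.pyGet? [p0,p1,p2,p3,p4,p5,p6] (-(PySem.Int.floordiv (-charge_w) 100))).getD 0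
       else (PySem.List.pyGet? [p0,p1,p2,p3,p4,p5,p6] 6).getD 0
            + (-(PySem.Int.floordiv (-charge_w) 100) - 6) * 100) + addon := by
  have hb : ((-(PySem.Int.floordiv (-charge_w) 100)) - 1) * 100 < charge_w ∧
      charge_w ≤ (-(PySem.Int.floordiv (-charge_w) 100)) * 100 :=
    (PySem.Int.neg_floordiv_neg_eq_iff_of_pos (by norm_num)).mp rfl
  set k := -(PySem.Int.floordiv (-charge_w) 100) with hk
  obtain ⟨hb1, hb2⟩ := hb
  by_cases h60 : charge_w ≤ 60
  · have hl : kinlianLoop [(60,p0),(100,p1),(200,p2),(300,p3),(400,p4),(500,p5),(600,p6)] charge_w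
        = some p0 := by simp only [kinlianLoop, if_pos h60]
    rw [hl]
    simp [PySem.List.pyGet?, PySem.List.pyIdx?, h60]
  · have hk1 : 1 ≤ k := by omega
    by_cases h6 : k ≤ 6
    · interval_cases k <;>
      · have hl : kinlianLoop [(60,p0),(100,p1),(200,p2),(300,p3),(400,p4),(500,p5),(600,p6)] charge_w
            = some (if charge_w ≤ 100 then p1 else if charge_w ≤ 200 then p2
                    else if charge_w ≤ 300 then p3 else if charge_w ≤ 400 then p4
                    else if charge_w ≤ 500 then p5 else p6) := by
          simp only [kinlianLoop]; split_ifs <;> first | rfl | omega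
        rw [hl]
        simp [PySem.List.pyGet?, PySem.List.pyIdx?]
        split_ifs <;> omega
    · have h600 : 600 < charge_w := by omega
      have hl : kinlianLoop [(60,p0),(100,p1),(200,p2),(300,p3),(400,p4),(500,p5),(600,p6)] charge_w
          = none := by simp only [kinlianLoop]; split_ifs <;> first | rfl | omega
      rw [hl]
      rw [PySem.Int.truncdiv, Int.tdiv_eq_ediv_of_nonneg (by omega),
          PySem.Int.mod_eq_emod_of_pos (by norm_num)]
      simp [PySem.List.pyGet?, PySem.List.pyIdx?, h60, h6]
      split_ifs <;> omega

-- ===== VERDICT (by name: the statement is the Claim_ definition above) =====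
theorem kinlian_price_spec : Claim_equal_kinlian_price := by
  intro area base charge_w addon _
  unfold Spec_kinlian_price kinlian_price kinlian_price_alt
  by_cases h1 : base = "高市"
  · subst h1
    have : PySem.Dict.getD KINLIAN "高市" ((PySem.Dict.get? KINLIAN "高市").getD [])
        = [(60,600),(100,800),(200,900),(300,1100),(400,1200),(500,1300),(600,1400)] := by decide
    rw [this]
    simpa using kinlian_core 600 800 900 1100 1200 1300 1400 charge_w addon
  · by_cases h2 : base = "台南"
    · subst h2
      have : PySem.Dict.getD KINLIAN "台南" ((PySem.Dict.get? KINLIAN "高市").getD [])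
          = [(60,900),(100,1100),(200,1200),(300,1400),(400,1500),(500,1600),(600,1700)] := by decide
      rw [this]
      simpa using kinlian_core 900 1100 1200 1400 1500 1600 1700 charge_w addon
    · have h1' : ("高市" == base) = false := beq_eq_false_iff_ne.mpr (Ne.symm h1)
      have h2' : ("台南" == base) = false := beq_eq_false_iff_ne.mpr (Ne.symm h2)
      have hitems : KINLIAN.items
          = [("高市", [(60,600),(100,800),(200,900),(300,1100),(400,1200),(500,1300),(600,1400)]),
             ("台南", [(60,900),(100,1100),(200,1200),(300,1400),(400,1500),(500,1600),(600,1700)])] := by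
        decide
      have : PySem.Dict.getD KINLIAN base ((PySem.Dict.get? KINLIAN "高市").getD [])
          = [(60,600),(100,800),(200,900),(300,1100),(400,1200),(500,1300),(600,1400)] := by
        simp [PySem.Dict.getD, PySem.Dict.get?, hitems, List.find?, h1', h2']
      rw [this]
      simpa using kinlian_core 600 800 900 1100 1200 1300 1400 charge_w addon
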